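-- pv_equiv track=rewrite | github.com/juliusbierk/imagetune | imagetune.py | add_written_names
-- ===== SOURCE A (Python) =====
-- def add_written_names(d):
--     counts = {}
--
--     for v in d.values():
--         counts[v["name"]] = counts.get(v["name"], 0) + 1
--     seen = {}
--
--     for v in d.values():
--         n = v["name"]
--         seen[n] = seen.get(n, 0) + 1
--         v["written_name"] = f"{n} {seen[n]}" if counts[n] > 1 else n
--
--     return d
-- ===== SOURCE B (Python) =====
-- def add_written_names(d):
--     groups = {}
--     for i, v in enumerate(d.values()):
--         groups.setdefault(v["name"], []).append(i)
--     vals = list(d.values())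
--     for name, idxs in groups.items():
--         if len(idxs) > 1:
--             for k, i in enumerate(idxs, 1):
--                 vals[i]["written_name"] = f"{name} {k}"
--         else:
--             vals[idxs[0]]["written_name"] = name
--     return d
-- ===== Notes on version B (the rewrite author's own statement) =====
-- stated objective: alternative
-- what changed: B replaces A's two threaded counter passes by a group-then-assign scheme: a first pass buckets entry indices by name, then a second pass walks each bucket and assigns 'name k' from the position inside the bucket (bare name for a singleton bucket), so no running 'seen' counter exists and the second traversal is per-name, not per-entry.
import Mathlib
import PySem

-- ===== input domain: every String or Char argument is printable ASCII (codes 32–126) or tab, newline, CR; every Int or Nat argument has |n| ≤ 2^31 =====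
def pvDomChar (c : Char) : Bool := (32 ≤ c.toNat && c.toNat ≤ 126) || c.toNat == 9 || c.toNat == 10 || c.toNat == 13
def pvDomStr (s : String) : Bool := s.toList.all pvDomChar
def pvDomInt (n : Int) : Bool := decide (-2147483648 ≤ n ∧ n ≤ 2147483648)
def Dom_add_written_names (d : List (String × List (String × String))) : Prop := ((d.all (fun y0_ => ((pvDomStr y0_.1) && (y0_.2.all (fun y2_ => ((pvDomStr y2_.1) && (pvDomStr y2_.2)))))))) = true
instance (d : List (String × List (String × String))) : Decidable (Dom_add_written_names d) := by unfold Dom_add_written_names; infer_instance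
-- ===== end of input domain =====

-- B replaces A's two threaded counter passes by group-then-assign: bucket the entry
-- indices by name, then walk each bucket assigning "name k" by bucket position
-- (bare name for singletons). Both Pythons mutate the inner value dicts in place;
-- the equivalence proved here is about the returned value (the ports render that
-- mutation by rebuilding the list; B's aliasing of value dicts is rendered by
-- grouping indices and applying the collected assignments at the end — exact).

-- v["name"] (Pre_ guarantees the key is present, so the default is never used)
def pvName (v : List (String × String)) : String :=
  ((PySem.Dict.mk v).get? "name").getD ""

-- v["written_name"] = wn (dict assignment on the inner dict)
def pvSetWN (kv : String × List (String × String)) (wn : String) : String × List (String × String) :=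
  (kv.1, ((PySem.Dict.mk kv.2).insert "written_name" wn).items)

-- ===== PORT A =====
def add_written_names (d : List (String × List (String × String))) : List (String × List (String × String)) :=
  let counts : PySem.Dict String Int :=
    d.foldl (fun c kv => c.insert (pvName kv.2) (c.getD (pvName kv.2) 0 + 1)) PySem.Dict.empty
  (d.foldl (fun st kv =>
      let n := pvName kv.2
      let seen := st.2.insert n (st.2.getD n 0 + 1)
      let wn := if counts.getD n 0 > 1 then n ++ " " ++ PySem.Int.toStr (seen.getD n 0) else n
      (st.1 ++ [pvSetWN kv wn], seen))
    (([] : List (String × List (String × String))), (PySem.Dict.empty : PySem.Dict String Int))).1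

-- ===== PORT B =====
-- groups.setdefault(name, []).append(i)  ≡  groups[name] = groups.get(name, []) + [i]  (Dict.modify)
def add_written_names_alt (d : List (String × List (String × String))) : List (String × List (String × String)) :=
  let groups : PySem.Dict String (List Int) :=
    (PySem.List.enumerate d 0).foldl
      (fun g ikv => g.modify (pvName ikv.2.2) [] (fun l => l ++ [ikv.1])) PySem.Dict.empty
  let assign : PySem.Dict Int String :=
    groups.items.foldl (fun a p =>
      if p.2.length > 1 then
        (PySem.List.enumerate p.2 1).foldl
          (fun a ki => a.insert ki.2 (p.1 ++ " " ++ PySem.Int.toStr ki.1)) a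
      else a.insert (PySem.List.pyGetD p.2 0 0) p.1) PySem.Dict.empty
  (PySem.List.enumerate d 0).map (fun ikv => pvSetWN ikv.2 (assign.getD ikv.1 ""))

-- ===== PRECONDITION & SPEC =====
-- Pre_ excludes inputs where some value dict lacks the key "name": there Python A raises KeyError (and so does B).
def Pre_add_written_names (d : List (String × List (String × String))) : Prop :=
  (d.all (fun kv => ((PySem.Dict.mk kv.2).get? "name").isSome)) = true
instance (d : List (String × List (String × String))) : Decidable (Pre_add_written_names d) := by
  unfold Pre_add_written_names; infer_instance
def pvWitness_add_written_names : (List (String × List (String × String))) :=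
  [("a", [("name", "x")]), ("b", [("name", "x")]), ("c", [("name", "y")])]

def Spec_add_written_names (d : List (String × List (String × String))) (out : List (String × List (String × String))) : Prop := out = add_written_names_alt d
instance (d : List (String × List (String × String))) (out : List (String × List (String × String))) : Decidable (Spec_add_written_names d out) := by unfold Spec_add_written_names; infer_instance

-- ===== CLAIM (what is proved, stated in full; the proofs are below) =====
def Claim_equal_add_written_names : Prop := ∀ (d : List (String × List (String × String))), Dom_add_written_names d → Pre_add_written_names d → Spec_add_written_names d (add_written_names d)

-- ===== LEMMAS AND PROOFS =====

-- canonical result: entry i gets suffix (count of its name in the prefix)+1 iff its name occurs > 1 times in N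
def pvCanon (N p : List String) : List (String × List (String × String)) → List (String × List (String × String))
  | [] => []
  | kv :: t =>
    let n := pvName kv.2
    let wn := if N.count n > 1 then n ++ " " ++ PySem.Int.toStr ((p.count n : Int) + 1) else n
    pvSetWN kv wn :: pvCanon N (p ++ [n]) t

def pvSeenOf (p : List String) : PySem.Dict String Int :=
  p.foldl (fun s x => s.insert x (s.getD x 0 + 1)) PySem.Dict.empty

lemma pvSeenOf_getD (p : List String) (n : String) :
    (pvSeenOf p).getD n 0 = (p.count n : Int) := by
  simp [pvSeenOf, PySem.Dict.getD_foldl_insert_add_one, PySem.Dict.getD_empty]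

lemma A_loop (counts : PySem.Dict String Int) (N : List String)
    (hc : ∀ n, counts.getD n 0 = (N.count n : Int)) :
    ∀ (l : List (String × List (String × String))) (acc : List (String × List (String × String))) (p : List String),
    (l.foldl (fun st kv =>
        let n := pvName kv.2
        let seen := st.2.insert n (st.2.getD n 0 + 1)
        let wn := if counts.getD n 0 > 1 then n ++ " " ++ PySem.Int.toStr (seen.getD n 0) else n
        (st.1 ++ [pvSetWN kv wn], seen)) (acc, pvSeenOf p)).1 = acc ++ pvCanon N p l := by
  intro l
  induction l with
  | nil => intro acc p; simp [pvCanon]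
  | cons kv t ih =>
    intro acc p
    have hseen : (pvSeenOf p).insert (pvName kv.2) ((pvSeenOf p).getD (pvName kv.2) 0 + 1)
        = pvSeenOf (p ++ [pvName kv.2]) := by
      simp [pvSeenOf, List.foldl_append]
    simp only [List.foldl_cons]
    rw [show ((acc, pvSeenOf p).2.insert (pvName kv.2) ((acc, pvSeenOf p).2.getD (pvName kv.2) 0 + 1))
        = pvSeenOf (p ++ [pvName kv.2]) from hseen]
    rw [ih]
    simp only [pvCanon, hc, pvSeenOf_getD, List.count_append, List.count_singleton]
    simp [List.append_assoc]

-- positions (as Int, from offset k) at which name n occurs in a name list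
def pvPos (k : Int) (n : String) : List String → List Int
  | [] => []
  | x :: t => (if x = n then [k] else []) ++ pvPos (k + 1) n t

lemma pvPos_append (k : Int) (n : String) (A B : List String) :
    pvPos k n (A ++ B) = pvPos k n A ++ pvPos (k + A.length) n B := by
  induction A generalizing k with
  | nil => simp [pvPos]
  | cons x t ih =>
    simp only [List.cons_append, pvPos, ih (k + 1)]
    simp [List.append_assoc]
    ring_nf

lemma length_pvPos (k : Int) (n : String) (N : List String) :
    (pvPos k n N).length = N.count n := by
  induction N generalizing k with
  | nil => simp [pvPos]
  | cons x t ih =>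
    by_cases h : x = n <;> simp [pvPos, h, ih]

lemma mem_pvPos (k : Int) (n : String) (N : List String) (i : Int) (h : i ∈ pvPos k n N) :
    ∃ j : Nat, ∃ hj : j < N.length, i = k + j ∧ N[j] = n := by
  induction N generalizing k with
  | nil => simp [pvPos] at h
  | cons x t ih =>
    simp only [pvPos, List.mem_append] at h
    rcases h with h | h
    · refine ⟨0, by simp, ?_⟩
      by_cases hx : x = n <;> simp [hx] at h ⊢
      omega
    · obtain ⟨j, hj, hi, hn⟩ := ih (k + 1) h
      exact ⟨j + 1, by simpa using hj, by omega, by simpa using hn⟩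

lemma ge_of_mem_pvPos (k : Int) (n : String) (N : List String) (i : Int) (h : i ∈ pvPos k n N) :
    k ≤ i := by
  obtain ⟨j, hj, hi, _⟩ := mem_pvPos k n N i h
  omega

-- grouping pass: the bucket of n is exactly the position list of n
lemma groups_getD (d : List (String × List (String × String))) (n : String) (k : Int) :
    (((PySem.List.enumerate d k).map (fun ikv => (pvName ikv.2.2, ikv.1))).filter
        (fun p => p.1 == n)).map (·.2)
      = pvPos k n (d.map (fun kv => pvName kv.2)) := by
  induction d generalizing k with
  | nil => simp [PySem.List.enumerate_nil, pvPos]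
  | cons kv t ih =>
    rw [PySem.List.enumerate_cons]
    by_cases h : pvName kv.2 = n <;>
      simp [pvPos, h, ih (k + 1)]

-- inserts at keys ≠ i preserve the lookup at i
lemma foldl_insert_preserve {β : Type} (i : Int) (key : β → Int) (val : β → String) :
    ∀ (l : List β) (a : PySem.Dict Int String), (∀ x ∈ l, key x ≠ i) →
      (l.foldl (fun a x => a.insert (key x) (val x)) a).getD i "" = a.getD i "" := by
  intro l
  induction l with
  | nil => intro a _; rfl
  | cons x t ih =>
    intro a h
    simp only [List.foldl_cons]
    rw [ih _ (fun y hy => h y (by simp [hy]))]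
    exact PySem.Dict.getD_insert_of_ne a _ _ (fun e => h x (by simp) (by omega))

lemma snd_mem_of_mem_enumerate {α : Type} (S : List α) (m : Int) (x : Int × α)
    (hx : x ∈ PySem.List.enumerate S m) : x.2 ∈ S := by
  obtain ⟨j, hj, he⟩ := (PySem.List.mem_enumerate_iff S m x).mp hx
  rw [he]
  exact List.getElem_mem hj

lemma inner_fold_getD (i : Int) (n : String) (P S : List Int) (a : PySem.Dict Int String) (k : Int)
    (hS : ∀ x ∈ S, x ≠ i) :
    ((PySem.List.enumerate (P ++ i :: S) k).foldl
        (fun a ki => a.insert ki.2 (n ++ " " ++ PySem.Int.toStr ki.1)) a).getD i ""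
      = n ++ " " ++ PySem.Int.toStr (k + P.length) := by
  rw [PySem.List.enumerate_append, List.foldl_append, PySem.List.enumerate_cons, List.foldl_cons]
  rw [foldl_insert_preserve i (fun ki : Int × Int => ki.2)
      (fun ki => n ++ " " ++ PySem.Int.toStr ki.1) _ _
      (fun x hx => hS x.2 (snd_mem_of_mem_enumerate _ _ _ hx))]
  exact PySem.Dict.getD_insert_self _ _ _ _

-- a bucket whose positions all differ from i leaves the lookup at i unchanged
lemma assign_preserve (i : Int)
    (p : String × List Int) (a : PySem.Dict Int String) (hne : p.2 ≠ [])
    (h : ∀ x ∈ p.2, x ≠ i) :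
    ((if p.2.length > 1 then
        (PySem.List.enumerate p.2 1).foldl
          (fun a ki => a.insert ki.2 (p.1 ++ " " ++ PySem.Int.toStr ki.1)) a
      else a.insert (PySem.List.pyGetD p.2 0 0) p.1)).getD i "" = a.getD i "" := by
  split_ifs with hl
  · exact foldl_insert_preserve i (fun ki : Int × Int => ki.2)
      (fun ki => p.1 ++ " " ++ PySem.Int.toStr ki.1) _ a
      (fun x hx => h x.2 (snd_mem_of_mem_enumerate _ _ _ hx))
  · rcases hp : p.2 with _ | ⟨x, t⟩
    · exact absurd hp hne
    · have hx : PySem.List.pyGetD (x :: t) 0 0 = x := by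
        simp [PySem.List.pyGetD, PySem.List.pyGet?, PySem.List.pyIdx?]
      rw [hx]
      exact PySem.Dict.getD_insert_of_ne a _ _ (fun e => h x (by simp [hp]) (by omega))

-- processing the bucket of n sets the lookup at i to the canonical written name
lemma assign_sets (names : List String) (n : String) (j : Nat)
    (hj : j < names.length) (hn : names[j] = n) (a : PySem.Dict Int String) :
    ((if (pvPos 0 n names).length > 1 then
        (PySem.List.enumerate (pvPos 0 n names) 1).foldl
          (fun a ki => a.insert ki.2 (n ++ " " ++ PySem.Int.toStr ki.1)) a
      else a.insert (PySem.List.pyGetD (pvPos 0 n names) 0 0) n)).getD (j : Int) ""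
      = (if names.count n > 1
          then n ++ " " ++ PySem.Int.toStr (((names.take j).count n : Int) + 1) else n) := by
  have hdecomp : pvPos 0 n names
      = pvPos 0 n (names.take j) ++ (j : Int) :: pvPos ((j : Int) + 1) n (names.drop (j + 1)) := by
    conv_lhs => rw [← List.take_append_drop j names]
    rw [List.drop_eq_getElem_cons hj, pvPos_append]
    have hlen : ((names.take j).length : Int) = (j : Int) := by
      simp [List.length_take, Nat.min_eq_left (Nat.le_of_lt hj)]
    rw [hlen]
    simp [pvPos, hn]
  have hlenP : (pvPos 0 n (names.take j)).length = (names.take j).count n := length_pvPos _ _ _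
  have hcount : (pvPos 0 n names).length = names.count n := length_pvPos _ _ _
  by_cases hc : names.count n > 1
  · rw [if_pos (by omega), if_pos hc, hdecomp,
      inner_fold_getD _ _ _ _ _ _
        (fun x hx e => by
          have := ge_of_mem_pvPos _ _ _ _ hx
          omega)]
    rw [hlenP]
    congr 1
    congr 1
    omega
  · have h1 : names.count n = 1 := by
      have : 0 < names.count n := List.count_pos_iff.mpr (hn ▸ List.getElem_mem hj)
      omega
    have hP : pvPos 0 n (names.take j) = [] := by
      have : (pvPos 0 n (names.take j)).length + 1 ≤ (pvPos 0 n names).length := by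
        rw [hdecomp]; simp
      rw [hcount, h1] at this
      exact List.eq_nil_of_length_eq_zero (by omega)
    have hS : pvPos ((j : Int) + 1) n (names.drop (j + 1)) = [] := by
      have : 1 + (pvPos ((j : Int) + 1) n (names.drop (j + 1))).length ≤ (pvPos 0 n names).length := by
        rw [hdecomp, hP]; simp; omega
      rw [hcount, h1] at this
      exact List.eq_nil_of_length_eq_zero (by omega)
    rw [if_neg (by rw [hcount, h1]; omega), if_neg hc]
    have hsingle : pvPos 0 n names = [(j : Int)] := by rw [hdecomp, hP, hS]; rfl
    rw [hsingle]
    have : PySem.List.pyGetD [(j : Int)] 0 0 = (j : Int) := by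
      simp [PySem.List.pyGetD, PySem.List.pyGet?, PySem.List.pyIdx?]
    rw [this]
    exact PySem.Dict.getD_insert_self a _ n ""

-- the assignment loop over all buckets yields the canonical written name at i
lemma assign_getD (names : List String) (n : String) (j : Nat)
    (hj : j < names.length) (hn : names[j] = n) :
    ∀ (its : List (String × List Int)) (a : PySem.Dict Int String),
    (∀ p ∈ its, p.2 = pvPos 0 p.1 names ∧ p.2 ≠ []) →
    (a.getD (j : Int) "" = (if names.count n > 1
        then n ++ " " ++ PySem.Int.toStr (((names.take j).count n : Int) + 1) else n)
      ∨ (n, pvPos 0 n names) ∈ its) →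
    ((its.foldl (fun a p =>
        if p.2.length > 1 then
          (PySem.List.enumerate p.2 1).foldl
            (fun a ki => a.insert ki.2 (p.1 ++ " " ++ PySem.Int.toStr ki.1)) a
        else a.insert (PySem.List.pyGetD p.2 0 0) p.1) a)).getD (j : Int) ""
      = (if names.count n > 1
          then n ++ " " ++ PySem.Int.toStr (((names.take j).count n : Int) + 1) else n) := by
  intro its
  induction its with
  | nil =>
    intro a _ hm
    rcases hm with hm | hm
    · exact hm
    · simp at hm
  | cons p t ih =>
    intro a hits hm
    simp only [List.foldl_cons]
    obtain ⟨hp2, hpne⟩ := hits p (by simp)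
    by_cases hpn : p.1 = n
    · refine ih _ (fun q hq => hits q (by simp [hq])) (Or.inl ?_)
      rcases p with ⟨p1, p2⟩
      simp only at hpn hp2
      subst hpn hp2
      exact assign_sets names p1 j hj hn a
    · have huntouched : ∀ x ∈ p.2, x ≠ (j : Int) := by
        intro x hx e
        rw [hp2] at hx
        obtain ⟨j', hj', hx', hn'⟩ := mem_pvPos _ _ _ _ hx
        have hjj : j' = j := by omega
        subst hjj
        exact hpn (hn'.symm.trans hn)
      refine ih _ (fun q hq => hits q (by simp [hq])) ?_
      rcases hm with hm | hm
      · exact Or.inl ((assign_preserve _ p a hpne huntouched).trans hm)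
      · rcases List.mem_cons.mp hm with he | hm
        · exact absurd (congrArg Prod.fst he.symm) hpn
        · exact Or.inr hm

lemma length_pvCanon (N : List String) :
    ∀ (l : List (String × List (String × String))) (p : List String),
    (pvCanon N p l).length = l.length := by
  intro l
  induction l with
  | nil => intro p; rfl
  | cons kv t ih => intro p; simp [pvCanon, ih]

lemma pvCanon_getElem (N : List String) :
    ∀ (l : List (String × List (String × String))) (p : List String) (j : Nat) (hj : j < l.length),
    (pvCanon N p l)[j]'(by rw [length_pvCanon]; exact hj)
      = pvSetWN l[j] (if N.count (pvName l[j].2) > 1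
          then pvName l[j].2 ++ " " ++
            PySem.Int.toStr (((p ++ (l.take j).map (fun kv => pvName kv.2)).count (pvName l[j].2) : Int) + 1)
          else pvName l[j].2) := by
  intro l
  induction l with
  | nil => intro p j hj; simp at hj
  | cons kv t ih =>
    intro p j hj
    rcases j with _ | j
    · simp [pvCanon]
    · have := ih (p ++ [pvName kv.2]) j (by simpa using hj)
      simp only [pvCanon, List.getElem_cons_succ, this, List.take_succ_cons, List.map_cons]
      rw [List.append_assoc]
      simp

-- ===== VERDICT (by name: the statement is the Claim_ definition above) =====
set_option maxHeartbeats 1000000 in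
theorem add_written_names_spec : Claim_equal_add_written_names := by
  intro d _ _
  unfold Spec_add_written_names
  have hc : ∀ n, (d.foldl (fun c kv => c.insert (pvName kv.2) (c.getD (pvName kv.2) 0 + 1))
      (PySem.Dict.empty : PySem.Dict String Int)).getD n 0
      = ((d.map (fun kv => pvName kv.2)).count n : Int) := by
    intro n
    rw [← List.foldl_map (f := fun (kv : String × List (String × String)) => pvName kv.2)
      (g := fun (c : PySem.Dict String Int) n => c.insert n (c.getD n 0 + 1))]
    simp [PySem.Dict.getD_foldl_insert_add_one, PySem.Dict.getD_empty]
  have hA : add_written_names d = pvCanon (d.map (fun kv => pvName kv.2)) [] d := by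
    unfold add_written_names
    show (d.foldl (fun st kv =>
        let n := pvName kv.2
        let seen := st.2.insert n (st.2.getD n 0 + 1)
        let wn := if (d.foldl (fun c kv => c.insert (pvName kv.2) (c.getD (pvName kv.2) 0 + 1))
            (PySem.Dict.empty : PySem.Dict String Int)).getD n 0 > 1
          then n ++ " " ++ PySem.Int.toStr (seen.getD n 0) else n
        (st.1 ++ [pvSetWN kv wn], seen))
      (([] : List (String × List (String × String))), pvSeenOf [])).1
      = [] ++ pvCanon (d.map (fun kv => pvName kv.2)) [] d
    exact A_loop _ _ hc d [] []
  -- ---- B side ----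
  have hGget : ∀ n, ((PySem.List.enumerate d 0).foldl
      (fun g ikv => g.modify (pvName ikv.2.2) [] (fun l => l ++ [ikv.1]))
      (PySem.Dict.empty : PySem.Dict String (List Int))).getD n []
        = pvPos 0 n (d.map (fun kv => pvName kv.2)) := by
    intro n
    have key : (PySem.List.enumerate d 0).foldl
        (fun g ikv => g.modify (pvName ikv.2.2) [] (fun l => l ++ [ikv.1]))
        (PySem.Dict.empty : PySem.Dict String (List Int))
        = ((PySem.List.enumerate d 0).map (fun ikv => (pvName ikv.2.2, ikv.1))).foldl
          (fun g p => g.modify p.1 [] (fun l => l ++ [p.2])) PySem.Dict.empty :=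
      (List.foldl_map (f := fun ikv : Int × (String × List (String × String)) => (pvName ikv.2.2, ikv.1))
        (g := fun (g : PySem.Dict String (List Int)) (p : String × Int) => g.modify p.1 [] (fun l => l ++ [p.2]))
        (l := PySem.List.enumerate d 0) (init := PySem.Dict.empty)).symm
    rw [key, PySem.Dict.getD_foldl_modify_append, groups_getD]
    simp [PySem.Dict.getD_empty]
  have hnd : ((PySem.List.enumerate d 0).foldl
      (fun g ikv => g.modify (pvName ikv.2.2) [] (fun l => l ++ [ikv.1]))
      (PySem.Dict.empty : PySem.Dict String (List Int))).keys.Nodup :=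
    PySem.Dict.nodup_keys_foldl_modify_key (PySem.List.enumerate d 0)
      (fun ikv => pvName ikv.2.2) [] (fun _ ikv => fun l => l ++ [ikv.1]) PySem.Dict.empty
      PySem.Dict.nodup_keys_empty
  have hmapname : (PySem.List.enumerate d 0).map (fun ikv => pvName ikv.2.2)
      = d.map (fun kv => pvName kv.2) := by
    conv_rhs => rw [← PySem.List.map_snd_enumerate d 0]
    rw [List.map_map]
    rfl
  have hkeys : ∀ x, x ∈ ((PySem.List.enumerate d 0).foldl
      (fun g ikv => g.modify (pvName ikv.2.2) [] (fun l => l ++ [ikv.1]))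
      (PySem.Dict.empty : PySem.Dict String (List Int))).keys
        ↔ x ∈ d.map (fun kv => pvName kv.2) := by
    intro x
    have hk : ((PySem.List.enumerate d 0).foldl
        (fun g ikv => g.modify (pvName ikv.2.2) [] (fun l => l ++ [ikv.1]))
        (PySem.Dict.empty : PySem.Dict String (List Int))).keys
        = PySem.Set.update (PySem.Dict.empty : PySem.Dict String (List Int)).keys
            ((PySem.List.enumerate d 0).map (fun ikv => pvName ikv.2.2)) :=
      PySem.Dict.keys_foldl_modify_key _ _ _ _ _
    rw [hk, hmapname]
    rw [PySem.Set.mem_update]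
    simp [PySem.Dict.keys_empty]
  have hitems : ∀ p ∈ ((PySem.List.enumerate d 0).foldl
      (fun g ikv => g.modify (pvName ikv.2.2) [] (fun l => l ++ [ikv.1]))
      (PySem.Dict.empty : PySem.Dict String (List Int))).items,
      p.2 = pvPos 0 p.1 (d.map (fun kv => pvName kv.2)) ∧ p.2 ≠ [] := by
    rintro ⟨k, v⟩ hp
    have h1 := PySem.Dict.get?_of_mem_items _ hp hnd
    have h2 : pvPos 0 k (d.map (fun kv => pvName kv.2)) = v := by
      rw [← hGget k, PySem.Dict.getD_eq_get?_getD, h1]; rfl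
    refine ⟨h2.symm, ?_⟩
    have hkmem : k ∈ d.map (fun kv => pvName kv.2) :=
      (hkeys k).mp (PySem.Dict.mem_keys_of_mem_items _ hp)
    have hcnt : 0 < (d.map (fun kv => pvName kv.2)).count k := List.count_pos_iff.mpr hkmem
    intro he
    have he' : v = [] := he
    rw [he'] at h2
    have := length_pvPos 0 k (d.map (fun kv => pvName kv.2))
    rw [h2] at this
    simp at this
    omega
  have hB : add_written_names_alt d = pvCanon (d.map (fun kv => pvName kv.2)) [] d := by
    show (PySem.List.enumerate d 0).map (fun ikv => pvSetWN ikv.2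
        ((((PySem.List.enumerate d 0).foldl
            (fun g ikv => g.modify (pvName ikv.2.2) [] (fun l => l ++ [ikv.1]))
            (PySem.Dict.empty : PySem.Dict String (List Int))).items.foldl
          (fun a p =>
            if p.2.length > 1 then
              (PySem.List.enumerate p.2 1).foldl
                (fun a ki => a.insert ki.2 (p.1 ++ " " ++ PySem.Int.toStr ki.1)) a
            else a.insert (PySem.List.pyGetD p.2 0 0) p.1)
          (PySem.Dict.empty : PySem.Dict Int String)).getD ikv.1 ""))
      = pvCanon (d.map (fun kv => pvName kv.2)) [] d
    apply List.ext_getElem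
    · simp [PySem.List.length_enumerate, length_pvCanon]
    · intro j h1 h2
      have hj : j < d.length := by
        simpa [PySem.List.length_enumerate] using h1
      have hjn : j < (d.map (fun kv => pvName kv.2)).length := by simpa using hj
      have hn : (d.map (fun kv => pvName kv.2))[j] = pvName d[j].2 := List.getElem_map _
      have hassign := assign_getD (d.map (fun kv => pvName kv.2)) (pvName d[j].2) j hjn hn
        (((PySem.List.enumerate d 0).foldl
            (fun g ikv => g.modify (pvName ikv.2.2) [] (fun l => l ++ [ikv.1]))
            (PySem.Dict.empty : PySem.Dict String (List Int))).items)
        PySem.Dict.empty hitems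
        (Or.inr ?mem)
      case mem =>
        have hmem : pvName d[j].2 ∈ d.map (fun kv => pvName kv.2) :=
          hn ▸ List.getElem_mem hjn
        have hget : ((PySem.List.enumerate d 0).foldl
            (fun g ikv => g.modify (pvName ikv.2.2) [] (fun l => l ++ [ikv.1]))
            (PySem.Dict.empty : PySem.Dict String (List Int))).get? (pvName d[j].2)
            = some (pvPos 0 (pvName d[j].2) (d.map (fun kv => pvName kv.2))) := by
          rcases hg : ((PySem.List.enumerate d 0).foldl
              (fun g ikv => g.modify (pvName ikv.2.2) [] (fun l => l ++ [ikv.1]))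
              (PySem.Dict.empty : PySem.Dict String (List Int))).get? (pvName d[j].2) with _ | v
          · exact absurd ((hkeys _).mpr hmem)
              ((PySem.Dict.get?_eq_none_iff_not_mem_keys _ _).mp hg)
          · have h3 := hGget (pvName d[j].2)
            rw [PySem.Dict.getD_eq_get?_getD, hg] at h3
            rw [hg]
            exact congrArg some (by simpa using h3)
        exact PySem.Dict.mem_items_of_get?_eq_some _ hget
      rw [List.getElem_map, PySem.List.getElem_enumerate]
      have hz : (0 : Int) + (j : Int) = (j : Int) := by omega
      rw [pvCanon_getElem (d.map (fun kv => pvName kv.2)) d [] j hj]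
      simp only [hz]
      rw [hassign]
      rw [List.nil_append, ← List.map_take]
  rw [hA, hB]
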